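-- pv_equiv track=rewrite | github.com/Ahmed20011994/knowva | backend/customer_support_agent.py | _prioritize_tickets
-- ===== SOURCE A (Python) =====
-- from typing import Dict, List, Optional, Any, Union
--
-- def _prioritize_tickets(tickets: List[Dict[str, Any]], max_tickets: int = 30) -> List[Dict[str, Any]]:
--     """Select and prioritize tickets for analysis"""
--     if not tickets:
--         return []
--
--     # Priority order: open, pending, hold, solved, closed
--     priority_statuses = ["open", "pending", "hold", "solved", "closed"]
--
--     prioritized = []
--     for status in priority_statuses:
--         status_tickets = [t for t in tickets if t.get("status", "").lower() == status]
--         prioritized.extend(status_tickets)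
--
--         if len(prioritized) >= max_tickets:
--             break
--
--     return prioritized[:max_tickets]
-- ===== SOURCE B (Python) =====
-- def _prioritize_tickets(tickets, max_tickets=30):
--     """Select and prioritize tickets for analysis"""
--     order = ["open", "pending", "hold", "solved", "closed"]
--     buckets = {status: [] for status in order}
--     for t in tickets:
--         status = t.get("status", "").lower()
--         if status in buckets:
--             buckets[status].append(t)
--     result = [t for status in order for t in buckets[status]]
--     return result[:max_tickets]
-- ===== Notes on version B (the rewrite author's own statement) =====
-- stated objective: simpler
-- what changed: B replaces A's five repeated scans of the ticket list (one per status, with an early break) by a single pass that buckets tickets into a dict keyed by the five priority statuses, then concatenates the buckets in priority order and slices to max_tickets.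
-- outside the precondition, e.g. on _prioritize_tickets([{'status': 'open'}, {'status': 'closed'}], -1): A returns [], B returns [{'status': 'open'}]
import Mathlib
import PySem

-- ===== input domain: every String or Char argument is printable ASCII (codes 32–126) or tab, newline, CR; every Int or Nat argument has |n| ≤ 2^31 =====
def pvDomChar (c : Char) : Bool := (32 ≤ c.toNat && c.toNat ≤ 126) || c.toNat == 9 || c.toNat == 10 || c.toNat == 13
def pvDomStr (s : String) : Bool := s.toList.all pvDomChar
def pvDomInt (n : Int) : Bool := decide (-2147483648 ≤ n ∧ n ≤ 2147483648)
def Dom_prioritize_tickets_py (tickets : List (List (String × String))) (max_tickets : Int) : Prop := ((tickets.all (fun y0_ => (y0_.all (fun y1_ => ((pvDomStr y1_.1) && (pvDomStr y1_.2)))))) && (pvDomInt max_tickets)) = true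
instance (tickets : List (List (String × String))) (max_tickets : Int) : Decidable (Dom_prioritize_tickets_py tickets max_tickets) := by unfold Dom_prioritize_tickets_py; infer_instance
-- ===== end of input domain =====

-- B buckets tickets by status in one pass instead of A's five repeated scans; equal results for max_tickets ≥ 0.


-- t.get("status", "").lower() — shared by both ports (both Pythons compute this exact expression);
-- dict lookup on the association list = first match.
def pvStatusOf (t : List (String × String)) : String :=
  PySem.Str.lower (((t.find? (fun p => p.1 == "status")).map (·.2)).getD "")

-- ===== PORT A =====
-- the for-loop over priority_statuses with its early break and accumulator `prioritized`
def pvLoopA (tickets : List (List (String × String))) (max_tickets : Int) :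
    List String → List (List (String × String)) → List (List (String × String))
  | [], acc => acc
  | s :: rest, acc =>
    let acc' := acc ++ tickets.filter (fun t => pvStatusOf t == s)
    if max_tickets ≤ (acc'.length : Int) then acc'
    else pvLoopA tickets max_tickets rest acc'

def prioritize_tickets_py (tickets : List (List (String × String))) (max_tickets : Int) : List (List (String × String)) :=
  if tickets = [] then []
  else PySem.List.slice
    (pvLoopA tickets max_tickets ["open", "pending", "hold", "solved", "closed"] [])
    none (some max_tickets)

-- ===== PORT B =====
def prioritize_tickets_py_alt (tickets : List (List (String × String))) (max_tickets : Int) : List (List (String × String)) :=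
  let order : List String := ["open", "pending", "hold", "solved", "closed"]
  let buckets0 : PySem.Dict String (List (List (String × String))) :=
    order.foldl (fun d s => d.insert s []) PySem.Dict.empty
  let buckets := tickets.foldl (fun d t =>
    let s := pvStatusOf t
    if d.contains s then d.modify s [] (· ++ [t]) else d) buckets0
  let result := order.foldl (fun acc s => acc ++ buckets.getD s []) []
  PySem.List.slice result none (some max_tickets)

-- ===== PRECONDITION & SPEC =====
-- Pre_ restricts to the natural domain of a ticket cap, max_tickets ≥ 0: for a negative max_tickets
-- (outside any caller's use) A's early break combined with Python's negative-slice semantics returns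
-- an accidental fragment of the "open" bucket alone, which B's natural slice does not mirror.
def Pre_prioritize_tickets_py (tickets : List (List (String × String))) (max_tickets : Int) : Prop :=
  0 ≤ max_tickets
instance (tickets : List (List (String × String))) (max_tickets : Int) : Decidable (Pre_prioritize_tickets_py tickets max_tickets) := by unfold Pre_prioritize_tickets_py; infer_instance

def pvWitness_prioritize_tickets_py : (List (List (String × String))) × Int :=
  ([[("status", "Closed")], [("status", "open")], [("id", "7")]], 2)

def Spec_prioritize_tickets_py (tickets : List (List (String × String))) (max_tickets : Int) (out : List (List (String × String))) : Prop := out = prioritize_tickets_py_alt tickets max_tickets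
instance (tickets : List (List (String × String))) (max_tickets : Int) (out : List (List (String × String))) : Decidable (Spec_prioritize_tickets_py tickets max_tickets out) := by unfold Spec_prioritize_tickets_py; infer_instance

-- ===== CLAIM (what is proved, stated in full; the proofs are below) =====
def Claim_equal_prioritize_tickets_py : Prop := ∀ (tickets : List (List (String × String))) (max_tickets : Int), Dom_prioritize_tickets_py tickets max_tickets → Pre_prioritize_tickets_py tickets max_tickets → Spec_prioritize_tickets_py tickets max_tickets (prioritize_tickets_py tickets max_tickets)

-- ===== LEMMAS AND PROOFS =====

-- B's bucket invariant: after folding a list of tickets, each key the dict already contains holds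
-- its old value followed by the matching tickets, in input order.
theorem pv_buckets_getD (ts : List (List (String × String)))
    (d : PySem.Dict String (List (List (String × String)))) (s : String)
    (h : d.contains s = true) :
    (ts.foldl (fun d t =>
      let k := pvStatusOf t
      if d.contains k then d.modify k [] (· ++ [t]) else d) d).getD s []
      = d.getD s [] ++ ts.filter (fun t => pvStatusOf t == s) := by
  induction ts generalizing d with
  | nil => simp
  | cons t ts ih =>
    simp only [List.foldl_cons, List.filter_cons]
    by_cases hk : pvStatusOf t = s
    · subst hk
      simp only [h, if_true, beq_self_eq_true]
      rw [ih _ (by simp [PySem.Dict.contains_modify, h]),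
          PySem.Dict.getD_modify_self]
      simp
    · have hb : (pvStatusOf t == s) = false := by simp [hk]
      rw [hb]
      by_cases hc : d.contains (pvStatusOf t) = true
      · simp only [hc, if_true]
        rw [ih _ (by simp [PySem.Dict.contains_modify, h]),
            PySem.Dict.getD_modify_of_ne _ _ _ (Ne.symm hk)]
        simp
      · simp only [Bool.not_eq_true] at hc
        simp only [hc, Bool.false_eq_true, if_false]
        simp only [hb] at *
        simp [ih _ h]
  
-- A's loop, taken up to max_tickets, ignores the break: it is the full concatenation of the buckets.
theorem pv_loopA_take (tickets : List (List (String × String))) (max_tickets : Int)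
    (hm : 0 ≤ max_tickets) (sts : List String) (acc : List (List (String × String))) :
    (pvLoopA tickets max_tickets sts acc).take max_tickets.toNat
      = (acc ++ sts.flatMap (fun s => tickets.filter (fun t => pvStatusOf t == s))).take max_tickets.toNat := by
  induction sts generalizing acc with
  | nil => simp [pvLoopA]
  | cons s rest ih =>
    simp only [pvLoopA, List.flatMap_cons]
    split
    · rename_i hbrk
      have hlen : max_tickets.toNat ≤ (acc ++ tickets.filter (fun t => pvStatusOf t == s)).length := by
        omega
      rw [← List.append_assoc, List.take_append_of_le_length hlen]
    · rw [ih]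
      simp
  
-- ===== VERDICT (by name: the statement is the Claim_ definition above) =====
theorem prioritize_tickets_py_spec : Claim_equal_prioritize_tickets_py := by
  intro tickets max_tickets _ hpre
  unfold Spec_prioritize_tickets_py prioritize_tickets_py prioritize_tickets_py_alt
  have hslice : ∀ xs : List (List (String × String)),
      PySem.List.slice xs none (some max_tickets) = xs.take max_tickets.toNat :=
    fun xs => PySem.List.slice_to xs hpre
  simp only [hslice]
  rw [PySem.List.foldl_append_eq_flatMap, List.nil_append]
  have hB : ∀ s ∈ (["open", "pending", "hold", "solved", "closed"] : List String),
      (tickets.foldl (fun d t =>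
        let k := pvStatusOf t
        if d.contains k then d.modify k [] (· ++ [t]) else d)
        ((["open", "pending", "hold", "solved", "closed"] : List String).foldl
          (fun d s => d.insert s []) PySem.Dict.empty)).getD s []
        = tickets.filter (fun t => pvStatusOf t == s) := by
    intro s hs
    rw [pv_buckets_getD]
    · have hd0 : ∀ s ∈ (["open", "pending", "hold", "solved", "closed"] : List String),
          ((["open", "pending", "hold", "solved", "closed"] : List String).foldl
            (fun d s => d.insert s []) PySem.Dict.empty).getD s
            ([] : List (List (String × String))) = [] := by decide
      rw [hd0 s hs]; simp
    · fin_cases hs <;> decide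
  rw [List.flatMap_congr (fun s hs => by rw [hB s hs])]
  split
  · rename_i hnil
    subst hnil
    simp
  · rw [pv_loopA_take tickets max_tickets hpre]
    simp
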